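-- pv_equiv track=rewrite | github.com/nikolavdjokic995-ctrl/Predictor2026 | predictor2026_dialog.py | _dynamic_mapping
-- ===== SOURCE A (Python) =====
-- def _dynamic_mapping(periods, dynamic_predictors):
--     mapping = []
--     grouped = {}
--     for pred in dynamic_predictors:
--         name = pred.get("name", "").strip()
--         if not name:
--             continue
--         grouped.setdefault(name, []).append(pred)
--
--     for period in periods:
--         try:
--             start_year_int = int(period.get("start_year", ""))
--         except Exception:
--             start_year_int = None
--         period_key = f"{period.get('start_year','?')}->{period.get('end_year','?')} ({period.get('purpose','')})"
--         for pred_name, rows in grouped.items():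
--             chosen = None
--             if start_year_int is not None:
--                 exact = [r for r in rows if str(r.get("year", "")).strip().isdigit() and int(str(r.get("year")).strip()) == start_year_int]
--                 if exact:
--                     chosen = exact[0]
--                 else:
--                     numeric_rows = [r for r in rows if str(r.get("year", "")).strip().isdigit()]
--                     if numeric_rows:
--                         chosen = min(numeric_rows, key=lambda r: abs(int(str(r.get("year")).strip()) - start_year_int))
--             if chosen is None and rows:
--                 chosen = rows[0]
--             mapping.append({
--                 "period": period_key,
--                 "predictor_name": pred_name,
--                 "requested_start_year": period.get("start_year", ""),
--                 "selected_predictor_year": chosen.get("year", "") if chosen else "",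
--                 "selected_layer_name": chosen.get("layer_name", "") if chosen else "",
--                 "selected_layer_source": chosen.get("layer_source", "") if chosen else "",
--             })
--     return mapping
-- ===== SOURCE B (Python) =====
-- def _dynamic_mapping(periods, dynamic_predictors):
--     # One-time index: per predictor name keep (first_row, parsed numeric (year,row) list);
--     # each period then takes a single running-best scan over the parsed pairs.
--     groups = {}
--     for pred in dynamic_predictors:
--         name = pred.get("name", "").strip()
--         if not name:
--             continue
--         entry = groups.setdefault(name, (pred, []))
--         ys = str(pred.get("year", "")).strip()
--         if ys.isdigit():
--             entry[1].append((int(ys), pred))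
--     mapping = []
--     for period in periods:
--         raw_start = period.get("start_year", "")
--         try:
--             target = int(raw_start)
--         except Exception:
--             target = None
--         period_key = "%s->%s (%s)" % (period.get("start_year", "?"),
--                                       period.get("end_year", "?"),
--                                       period.get("purpose", ""))
--         for pred_name, (first, nums) in groups.items():
--             chosen = first
--             if target is not None:
--                 best = None
--                 for year, row in nums:
--                     dist = abs(year - target)
--                     if best is None or dist < best[0]:
--                         best = (dist, row)
--                 if best is not None:
--                     chosen = best[1]
--             mapping.append({
--                 "period": period_key,
--                 "predictor_name": pred_name,
--                 "requested_start_year": raw_start,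
--                 "selected_predictor_year": chosen.get("year", ""),
--                 "selected_layer_name": chosen.get("layer_name", ""),
--                 "selected_layer_source": chosen.get("layer_source", ""),
--             })
--     return mapping
-- ===== Notes on version B (the rewrite author's own statement) =====
-- stated objective: alternative
-- what changed: B builds a one-time per-name index holding the group's first row and its pre-parsed (year,row) numeric list, then picks each period's row with a single running-best scan, instead of A's per-period re-filtering (exact-match list + numeric-rows list comprehensions + min(), re-parsing every year string for every period).
import Mathlib
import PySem

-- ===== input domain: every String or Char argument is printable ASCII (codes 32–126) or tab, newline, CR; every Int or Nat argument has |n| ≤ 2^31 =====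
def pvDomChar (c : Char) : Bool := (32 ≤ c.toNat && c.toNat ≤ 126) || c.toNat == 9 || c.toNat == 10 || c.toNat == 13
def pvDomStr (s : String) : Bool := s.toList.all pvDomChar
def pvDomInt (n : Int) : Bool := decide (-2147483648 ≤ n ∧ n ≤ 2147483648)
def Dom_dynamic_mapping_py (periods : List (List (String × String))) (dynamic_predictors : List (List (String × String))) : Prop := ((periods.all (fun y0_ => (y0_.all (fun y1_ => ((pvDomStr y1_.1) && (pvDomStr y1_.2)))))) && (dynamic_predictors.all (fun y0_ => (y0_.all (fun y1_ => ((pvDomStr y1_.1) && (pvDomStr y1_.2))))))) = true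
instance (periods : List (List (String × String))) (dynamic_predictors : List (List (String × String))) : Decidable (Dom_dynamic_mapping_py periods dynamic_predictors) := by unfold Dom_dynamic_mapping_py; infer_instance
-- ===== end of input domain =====

-- B replaces A's per-period re-filtering (exact list + numeric list + min()) with a one-time
-- per-name index (first row + pre-parsed numeric (year,row) list) and a single running-best scan
-- (objective: alternative).

-- ===== PORT A =====

-- pred.get("name", "").strip()
def aNm (p : List (String × String)) : String := PySem.Str.strip ((PySem.Dict.mk p).getD "name" "")
-- str(r.get("year", "")).strip()
def aYs (r : List (String × String)) : String := PySem.Str.strip ((PySem.Dict.mk r).getD "year" "")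
def aDig (r : List (String × String)) : Bool := PySem.Str.strIsdigit (aYs r)
-- int(str(r.get("year")).strip()); only evaluated after aDig r = true, where ofStr? parses
def aVal (r : List (String × String)) : Int := (PySem.Int.ofStr? (aYs r)).getD 0

-- grouped.setdefault(name, []).append(pred), skipping empty names
def aGroupStep (g : PySem.Dict String (List (List (String × String)))) (p : List (String × String)) :
    PySem.Dict String (List (List (String × String))) :=
  if aNm p = "" then g else g.modify (aNm p) [] (fun rs => rs ++ [p])

def aGroup (preds : List (List (String × String))) : PySem.Dict String (List (List (String × String))) :=
  preds.foldl aGroupStep PySem.Dict.empty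

-- the body of the inner loop: exact list, else min() over numeric rows, else rows[0]
def aChoose (t? : Option Int) (rows : List (List (String × String))) : Option (List (String × String)) :=
  let chosen : Option (List (String × String)) :=
    match t? with
    | some t =>
      match rows.filter (fun r => aDig r && (aVal r == t)) with
      | e :: _ => some e
      | [] =>
        match PySem.List.min? (rows.filter (fun r => aDig r)) (fun r => |aVal r - t|) with
        | some m => some m
        | none => none
    | none => none
  match chosen with
  | some c => some c
  | none => rows.head?   -- `if chosen is None and rows: chosen = rows[0]`

-- chosen.get(key, "") if chosen else ""   (None and the empty dict are falsy)
def aField (chosen : Option (List (String × String))) (key : String) : String :=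
  match chosen with
  | some c => if c = [] then "" else (PySem.Dict.mk c).getD key ""
  | none => ""

def dynamic_mapping_py (periods : List (List (String × String))) (dynamic_predictors : List (List (String × String))) : List (List (String × String)) :=
  let grouped := aGroup dynamic_predictors
  periods.foldl (fun acc period =>
    let sy := (PySem.Dict.mk period).getD "start_year" ""
    let t? : Option Int := PySem.Int.ofStr? sy
    let pkey := ((PySem.Dict.mk period).getD "start_year" "?") ++ "->" ++ ((PySem.Dict.mk period).getD "end_year" "?") ++ " (" ++ ((PySem.Dict.mk period).getD "purpose" "") ++ ")"
    grouped.items.foldl (fun acc2 pr =>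
      let chosen := aChoose t? pr.2
      acc2 ++ [[("period", pkey), ("predictor_name", pr.1), ("requested_start_year", sy),
                ("selected_predictor_year", aField chosen "year"),
                ("selected_layer_name", aField chosen "layer_name"),
                ("selected_layer_source", aField chosen "layer_source")]]) acc) []

-- ===== PORT B =====

def bNm (p : List (String × String)) : String := PySem.Str.strip ((PySem.Dict.mk p).getD "name" "")
def bYs (r : List (String × String)) : String := PySem.Str.strip ((PySem.Dict.mk r).getD "year" "")

-- entry = groups.setdefault(name, (pred, [])); if ys.isdigit(): entry[1].append((int(ys), pred))
def bGroupStep (g : PySem.Dict String ((List (String × String)) × List (Int × List (String × String)))) (p : List (String × String)) :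
    PySem.Dict String ((List (String × String)) × List (Int × List (String × String))) :=
  if bNm p = "" then g
  else
    let g' := g.setdefault (bNm p) (p, [])
    if PySem.Str.strIsdigit (bYs p) then
      g'.modify (bNm p) (p, []) (fun e => (e.1, e.2 ++ [((PySem.Int.ofStr? (bYs p)).getD 0, p)]))
    else g'

def bGroup (preds : List (List (String × String))) : PySem.Dict String ((List (String × String)) × List (Int × List (String × String))) :=
  preds.foldl bGroupStep PySem.Dict.empty

-- the body of B's running-best loop: keep (dist, row) only on strict improvement
def bstep {α : Type} (t : Int) : Option (Int × α) → (Int × α) → Option (Int × α) :=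
  fun best yr => match best with
    | none => some (|yr.1 - t|, yr.2)
    | some b => if |yr.1 - t| < b.1 then some (|yr.1 - t|, yr.2) else best

-- the running-best scan over the pre-parsed numeric list
def bBest (t : Int) (nums : List (Int × List (String × String))) : Option (Int × List (String × String)) :=
  nums.foldl (bstep t) none

def bChoose (t? : Option Int) (first : List (String × String)) (nums : List (Int × List (String × String))) : List (String × String) :=
  match t? with
  | some t =>
    match bBest t nums with
    | some b => b.2
    | none => first
  | none => first

def dynamic_mapping_py_alt (periods : List (List (String × String))) (dynamic_predictors : List (List (String × String))) : List (List (String × String)) :=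
  let groups := bGroup dynamic_predictors
  periods.foldl (fun acc period =>
    let raw := (PySem.Dict.mk period).getD "start_year" ""
    let t? : Option Int := PySem.Int.ofStr? raw
    let pkey := ((PySem.Dict.mk period).getD "start_year" "?") ++ "->" ++ ((PySem.Dict.mk period).getD "end_year" "?") ++ " (" ++ ((PySem.Dict.mk period).getD "purpose" "") ++ ")"
    groups.items.foldl (fun acc2 pr =>
      let chosen := bChoose t? pr.2.1 pr.2.2
      acc2 ++ [[("period", pkey), ("predictor_name", pr.1), ("requested_start_year", raw),
                ("selected_predictor_year", (PySem.Dict.mk chosen).getD "year" ""),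
                ("selected_layer_name", (PySem.Dict.mk chosen).getD "layer_name" ""),
                ("selected_layer_source", (PySem.Dict.mk chosen).getD "layer_source" "")]]) acc) []

-- ===== PRECONDITION & SPEC =====
def Spec_dynamic_mapping_py (periods : List (List (String × String))) (dynamic_predictors : List (List (String × String))) (out : List (List (String × String))) : Prop := out = dynamic_mapping_py_alt periods dynamic_predictors
instance (periods : List (List (String × String))) (dynamic_predictors : List (List (String × String))) (out : List (List (String × String))) : Decidable (Spec_dynamic_mapping_py periods dynamic_predictors out) := by unfold Spec_dynamic_mapping_py; infer_instance

-- ===== CLAIM (what is proved, stated in full; the proofs are below) =====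
def Claim_equal_dynamic_mapping_py : Prop := ∀ (periods : List (List (String × String))) (dynamic_predictors : List (List (String × String))), Dom_dynamic_mapping_py periods dynamic_predictors → Spec_dynamic_mapping_py periods dynamic_predictors (dynamic_mapping_py periods dynamic_predictors)

-- ===== LEMMAS AND PROOFS =====

def minstep {α : Type} (k : α → Int) : Option α → α → Option α :=
  fun acc x => match acc with
    | none => some x
    | some m => if k x < k m then some x else some m

theorem foldl_bstep_gen {α : Type} (t : Int) (f : α → Int) (l : List α) :
    ∀ acc : Option α,
      (l.map (fun r => (f r, r))).foldl (bstep t) (acc.map (fun m => (|f m - t|, m))) =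
      (l.foldl (minstep (fun r => |f r - t|)) acc).map (fun m => (|f m - t|, m)) := by
  induction l with
  | nil => intro acc; rfl
  | cons x tl ih =>
    intro acc
    rw [List.map_cons, List.foldl_cons, List.foldl_cons]
    cases acc with
    | none =>
      rw [show (Option.none.map (fun m => (|f m - t|, m)) : Option (Int × α)) = none from rfl]
      rw [show bstep t none (f x, x) = ((some x).map (fun m => (|f m - t|, m))) from rfl]
      rw [show minstep (fun r => |f r - t|) none x = some x from rfl]
      exact ih (some x)
    | some m =>
      rw [show ((some m).map (fun m => (|f m - t|, m))) = some (|f m - t|, m) from rfl]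
      by_cases hlt : |f x - t| < |f m - t|
      · rw [show bstep t (some (|f m - t|, m)) (f x, x) = some (|f x - t|, x) by
          simp [bstep, hlt]]
        rw [show minstep (fun r => |f r - t|) (some m) x = some x by simp [minstep, hlt]]
        exact ih (some x)
      · rw [show bstep t (some (|f m - t|, m)) (f x, x) = some (|f m - t|, m) by
          simp [bstep, hlt]]
        rw [show minstep (fun r => |f r - t|) (some m) x = some m by simp [minstep, hlt]]
        exact ih (some m)

theorem min?_eq_foldl {α : Type} (l : List α) (k : α → Int) :
    PySem.List.min? l k = l.foldl (minstep k) none := rfl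

def convG (rs : List (List (String × String))) : (List (String × String)) × List (Int × List (String × String)) :=
  (rs.headD [], rs.filterMap (fun r => if aDig r then some (aVal r, r) else none))

theorem filterMap_dig (rs : List (List (String × String))) :
    rs.filterMap (fun r => if aDig r then some (aVal r, r) else none) =
      (rs.filter aDig).map (fun r => (aVal r, r)) := by
  induction rs with
  | nil => rfl
  | cons r tl ih =>
    by_cases h : aDig r <;> simp [List.filterMap_cons, h, ih]

theorem foldl_minstep_keep {α : Type} (k : α → Int) (l : List α) (m : α)
    (h : ∀ y ∈ l, ¬ (k y < k m)) : l.foldl (minstep k) (some m) = some m := by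
  induction l with
  | nil => rfl
  | cons x t ih =>
    have hx : ¬ (k x < k m) := h x (by simp)
    simp only [List.foldl_cons, minstep, if_neg hx]
    exact ih (fun y hy => h y (by simp [hy]))

theorem foldl_minstep_zero {α : Type} (k : α → Int) (e : α) (l : List α) :
    ∀ (m : α) (rest : List α), (∀ x ∈ l, 0 ≤ k x) → 0 < k m →
    l.filter (fun x => k x == 0) = e :: rest → l.foldl (minstep k) (some m) = some e := by
  induction l with
  | nil => intro m rest _ _ hf; simp at hf
  | cons x t ih =>
    intro m rest h0 hm hf
    by_cases hx : k x = 0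
    · have hfc : (x :: t).filter (fun x => k x == 0) = x :: t.filter (fun x => k x == 0) := by
        simp [hx]
      rw [hfc, List.cons.injEq] at hf
      have hstep : minstep k (some m) x = some x := by
        simp [minstep, hx, hm]
      rw [List.foldl_cons, hstep, ← hf.1]
      exact foldl_minstep_keep k t x (fun y hy => by
        have := h0 y (by simp [hy]); omega)
    · have hxpos : 0 < k x := lt_of_le_of_ne (h0 x (by simp)) (Ne.symm hx)
      have hft : t.filter (fun x => k x == 0) = e :: rest := by
        simpa [hx] using hf
      rw [List.foldl_cons]
      by_cases hlt : k x < k m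
      · rw [show minstep k (some m) x = some x by simp [minstep, hlt]]
        exact ih x rest (fun y hy => h0 y (by simp [hy])) hxpos hft
      · rw [show minstep k (some m) x = some m by simp [minstep, hlt]]
        exact ih m rest (fun y hy => h0 y (by simp [hy])) hm hft

theorem min?_first_zero {α : Type} (k : α → Int) (l : List α) (e : α) (rest : List α)
    (h0 : ∀ x ∈ l, 0 ≤ k x)
    (hf : l.filter (fun x => k x == 0) = e :: rest) :
    PySem.List.min? l k = some e := by
  cases l with
  | nil => simp at hf
  | cons x t =>
    rw [min?_eq_foldl, List.foldl_cons]
    rw [show minstep k none x = some x from rfl]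
    by_cases hx : k x = 0
    · have hfc : (x :: t).filter (fun x => k x == 0) = x :: t.filter (fun x => k x == 0) := by
        simp [hx]
      rw [hfc, List.cons.injEq] at hf
      rw [← hf.1]
      exact foldl_minstep_keep k t x (fun y hy => by
        have := h0 y (by simp [hy]); omega)
    · have hxpos : 0 < k x := lt_of_le_of_ne (h0 x (by simp)) (Ne.symm hx)
      have hft : t.filter (fun x => k x == 0) = e :: rest := by
        simpa [hx] using hf
      exact foldl_minstep_zero k e t x rest (fun y hy => h0 y (by simp [hy])) hxpos hft

theorem bBest_eq (t : Int) (l : List (List (String × String))) :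
    bBest t (l.map (fun r => (aVal r, r))) =
      (PySem.List.min? l (fun r => |aVal r - t|)).map (fun m => (|aVal m - t|, m)) := by
  unfold bBest
  rw [min?_eq_foldl]
  have := foldl_bstep_gen t aVal l none
  simpa using this

theorem filter_exact_eq (rows : List (List (String × String))) (t : Int) :
    rows.filter (fun r => aDig r && (aVal r == t)) =
      (rows.filter aDig).filter (fun r => (|aVal r - t| == 0)) := by
  rw [List.filter_filter]
  apply List.filter_congr
  intro r _
  by_cases h : aVal r = t
  · simp [h, aDig]
  · have h2 : |aVal r - t| ≠ 0 := by
      rw [abs_ne_zero]; exact sub_ne_zero.mpr h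
    have e1 : (aVal r == t) = false := by simp [h]
    have e2 : (|aVal r - t| == 0) = false := by simp [h2]
    rw [e1, e2]
    simp

theorem choose_eq (t? : Option Int) (rows : List (List (String × String))) (hne : rows ≠ []) :
    ∃ c, aChoose t? rows = some c ∧ c ∈ rows ∧ c = bChoose t? ((convG rows).1) ((convG rows).2) := by
  obtain ⟨r0, tl, rfl⟩ : ∃ r0 tl, rows = r0 :: tl := by
    cases rows with
    | nil => exact absurd rfl hne
    | cons a b => exact ⟨a, b, rfl⟩
  cases t? with
  | none =>
    exact ⟨r0, rfl, by simp, rfl⟩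
  | some t =>
    have hconv : (convG (r0 :: tl)).2 = ((r0 :: tl).filter aDig).map (fun r => (aVal r, r)) := by
      simp [convG, filterMap_dig]
    cases hE : (r0 :: tl).filter (fun r => aDig r && (aVal r == t)) with
    | cons e rest =>
      have hmin : PySem.List.min? ((r0 :: tl).filter aDig) (fun r => |aVal r - t|) = some e := by
        apply min?_first_zero _ _ e rest (fun x _ => abs_nonneg _)
        rw [← filter_exact_eq, hE]
      refine ⟨e, ?_, ?_, ?_⟩
      · simp only [aChoose, hE]
      · have : e ∈ (r0 :: tl).filter (fun r => aDig r && (aVal r == t)) := by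
          rw [hE]; simp
        exact List.mem_of_mem_filter this
      · simp only [bChoose, hconv, bBest_eq, hmin, Option.map_some]
    | nil =>
      cases hM : PySem.List.min? ((r0 :: tl).filter aDig) (fun r => |aVal r - t|) with
      | some m =>
        refine ⟨m, ?_, ?_, ?_⟩
        · simp only [aChoose, hE, hM]
        · exact List.mem_of_mem_filter (PySem.List.min?_mem hM)
        · simp only [bChoose, hconv, bBest_eq, hM, Option.map_some]
      | none =>
        refine ⟨r0, ?_, by simp, ?_⟩
        · simp only [aChoose, hE, hM, List.head?]
        · simp only [bChoose, hconv, bBest_eq, hM, Option.map_none]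
          rfl

def convQ (q : String × List (List (String × String))) : String × ((List (String × String)) × List (Int × List (String × String))) :=
  (q.1, convG q.2)

def InvG (a : PySem.Dict String (List (List (String × String))))
    (b : PySem.Dict String ((List (String × String)) × List (Int × List (String × String)))) : Prop :=
  b.items = a.items.map convQ ∧
  (∀ q ∈ a.items, q.1 ≠ "" ∧ q.2 ≠ [] ∧ ∀ r ∈ q.2, r ≠ []) ∧
  (a.items.map Prod.fst).Nodup

theorem aNm_nil : aNm [] = "" := rfl

theorem find?_map_conv (l : List (String × List (List (String × String)))) (k : String) :
    (l.map convQ).find? (fun q => q.1 == k) = (l.find? (fun q => q.1 == k)).map convQ := by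
  rw [List.find?_map]
  rfl

theorem get?_conv (a : PySem.Dict String (List (List (String × String))))
    (b : PySem.Dict String ((List (String × String)) × List (Int × List (String × String))))
    (hit : b.items = a.items.map convQ) (k : String) :
    b.get? k = (a.get? k).map convG := by
  simp only [PySem.Dict.get?, hit, find?_map_conv, Option.map_map]
  rfl

theorem contains_conv (a : PySem.Dict String (List (List (String × String))))
    (b : PySem.Dict String ((List (String × String)) × List (Int × List (String × String))))
    (hit : b.items = a.items.map convQ) (k : String) :
    b.contains k = a.contains k := by
  simp only [PySem.Dict.contains, hit, List.any_map]
  rfl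

theorem eq_of_mem_key_nodup {β : Type} : ∀ (l : List (String × β)), (l.map Prod.fst).Nodup →
    ∀ q q' : String × β, q ∈ l → q' ∈ l → q.1 = q'.1 → q = q' := by
  intro l
  induction l with
  | nil => intro _ q q' hq; simp at hq
  | cons x t ih =>
    intro hnd q q' hq hq' hk
    rw [List.map_cons, List.nodup_cons] at hnd
    rcases List.mem_cons.mp hq with rfl | hq1
    · rcases List.mem_cons.mp hq' with rfl | hq'1
      · rfl
      · exfalso; apply hnd.1; rw [hk]; exact List.mem_map_of_mem hq'1
    · rcases List.mem_cons.mp hq' with rfl | hq'1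
      · exfalso; apply hnd.1; rw [← hk]; exact List.mem_map_of_mem hq1
      · exact ih hnd.2 q q' hq1 hq'1 hk

set_option maxHeartbeats 2000000 in
theorem invG_step (a : PySem.Dict String (List (List (String × String))))
    (b : PySem.Dict String ((List (String × String)) × List (Int × List (String × String))))
    (p : List (String × String)) (h : InvG a b) : InvG (aGroupStep a p) (bGroupStep b p) := by
  obtain ⟨hit, hprop, hnd⟩ := h
  unfold aGroupStep bGroupStep
  by_cases hn : aNm p = ""
  · rw [if_pos hn, if_pos (show bNm p = "" from hn)]
    exact ⟨hit, hprop, hnd⟩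
  rw [if_neg hn, if_neg (show ¬ bNm p = "" from hn)]
  have hp_ne : p ≠ [] := by
    intro hp; exact hn (hp ▸ aNm_nil)
  have hba : bNm p = aNm p := rfl
  have hcontains : b.contains (bNm p) = a.contains (aNm p) := by
    rw [hba]; exact contains_conv a b hit _
  by_cases hc : a.contains (aNm p) = true
  · -- existing group
    have hbc : b.contains (bNm p) = true := by rw [hcontains]; exact hc
    -- the first-match value rs
    have hgs : ∃ rs, a.get? (aNm p) = some rs := by
      simp only [PySem.Dict.contains, List.any_eq_true] at hc
      obtain ⟨q, hq, hqk⟩ := hc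
      have hsome : (a.items.find? (fun q => q.1 == aNm p)).isSome = true :=
        List.find?_isSome.mpr ⟨q, hq, hqk⟩
      simp only [PySem.Dict.get?]
      cases hf : a.items.find? (fun q => q.1 == aNm p) with
      | none => rw [hf] at hsome; simp at hsome
      | some q' => exact ⟨q'.2, rfl⟩
    obtain ⟨rs, hrs⟩ := hgs
    have hmem : (aNm p, rs) ∈ a.items := by
      have h1 : a.items.find? (fun q => q.1 == aNm p) = some (aNm p, rs) := by
        simp only [PySem.Dict.get?] at hrs
        cases hf : a.items.find? (fun q => q.1 == aNm p) with
        | none => rw [hf] at hrs; simp at hrs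
        | some q' =>
          rw [hf] at hrs
          simp only [Option.map_some, Option.some.injEq] at hrs
          have hq'k : q'.1 = aNm p := by simpa [beq_iff_eq] using List.find?_some hf
          exact congrArg some (Prod.ext hq'k hrs)
      exact List.mem_of_find?_eq_some h1
    have hrs_props := hprop _ hmem
    have hrs_ne : rs ≠ [] := hrs_props.2.1
    have hgetDa : a.getD (aNm p) [] = rs := by
      simp [PySem.Dict.getD, hrs]
    have hgetDb : b.getD (bNm p) (p, []) = convG rs := by
      simp [PySem.Dict.getD, hba, get?_conv a b hit, hrs]
    -- both sides are inserts at an existing key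
    have hmod_a : a.modify (aNm p) [] (fun rs => rs ++ [p]) = a.insert (aNm p) (rs ++ [p]) := by
      simp [PySem.Dict.modify, hgetDa]
    have hsd : b.setdefault (bNm p) (p, []) = b := PySem.Dict.setdefault_of_contains b (p, []) hbc
    have hconv_append : convG (rs ++ [p]) =
        ((convG rs).1, (convG rs).2 ++ (if aDig p then [(aVal p, p)] else [])) := by
      have h2 : (rs ++ [p]).filterMap (fun r => if aDig r then some (aVal r, r) else none) =
          rs.filterMap (fun r => if aDig r then some (aVal r, r) else none) ++
            (if aDig p then [(aVal p, p)] else []) := by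
        rw [List.filterMap_append]
        congr 1
        by_cases hd : aDig p <;> simp [hd]
      have h1 : (rs ++ [p]).headD [] = rs.headD [] := by
        cases rs with
        | nil => exact absurd rfl hrs_ne
        | cons x y => rfl
      unfold convG
      rw [h1, h2]
    have hitems_a : (a.insert (aNm p) (rs ++ [p])).items =
        a.items.map (fun q => if q.1 == aNm p then (aNm p, rs ++ [p]) else q) := by
      simp [PySem.Dict.insert, hc]
    -- key fact: any entry with key aNm p equals (aNm p, rs)
    have hkeyval : ∀ q ∈ a.items, q.1 = aNm p → q.2 = rs := by
      intro q hq hqk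
      have := eq_of_mem_key_nodup a.items hnd q (aNm p, rs) hq hmem hqk
      rw [this]
    constructor
    · -- items relation
      by_cases hd : PySem.Str.strIsdigit (bYs p)
      · rw [hsd]
        have hmod_b : b.modify (bNm p) (p, []) (fun e => (e.1, e.2 ++ [((PySem.Int.ofStr? (bYs p)).getD 0, p)])) =
            b.insert (bNm p) ((convG rs).1, (convG rs).2 ++ [(aVal p, p)]) := by
          simp only [PySem.Dict.modify, hgetDb]
          rfl
        simp only [if_pos hd, hmod_b, hmod_a]
        have hitems_b : (b.insert (bNm p) ((convG rs).1, (convG rs).2 ++ [(aVal p, p)])).items =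
            b.items.map (fun q => if q.1 == bNm p then (bNm p, ((convG rs).1, (convG rs).2 ++ [(aVal p, p)])) else q) := by
          simp [PySem.Dict.insert, hbc]
        rw [hitems_b, hitems_a, hit, List.map_map, List.map_map]
        apply List.map_congr_left
        intro q hq
        by_cases hqk : q.1 = aNm p
        · simp only [Function.comp_apply, convQ, hqk, hba]
          simp only [beq_self_eq_true, if_true]
          have hda : aDig p = true := hd
          rw [hconv_append, hda]
          simp
        · simp only [Function.comp_apply, convQ]
          have hne : (q.1 == aNm p) = false := by simp [hqk]
          rw [hba]
          simp [hne]
      · rw [if_neg hd, hsd, hmod_a, hitems_a, hit, List.map_map]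
        symm
        apply List.map_congr_left
        intro q hq
        by_cases hqk : q.1 = aNm p
        · have hq2 : q.2 = rs := hkeyval q hq hqk
          have hsel : (if (q.1 == aNm p) = true then (aNm p, rs ++ [p]) else q) = (aNm p, rs ++ [p]) := by
            simp [hqk]
          rw [Function.comp_apply, hsel]
          have hda : aDig p = false := by simpa [aDig] using hd
          unfold convQ
          rw [hconv_append, hda]
          rw [← hqk, hq2]
          simp
        · have hsel : (if (q.1 == aNm p) = true then (aNm p, rs ++ [p]) else q) = q := by
            simp [hqk]
          rw [Function.comp_apply, hsel]
    constructor
    · -- element properties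
      intro q hq
      rw [hmod_a, hitems_a] at hq
      obtain ⟨q0, hq0, hq0e⟩ := List.mem_map.mp hq
      by_cases hqk : q0.1 = aNm p
      · have : q = (aNm p, rs ++ [p]) := by
          rw [← hq0e]; simp [hqk]
        rw [this]
        refine ⟨hn, by simp, ?_⟩
        intro r hr
        rcases List.mem_append.mp hr with hr | hr
        · exact (hprop _ hmem).2.2 r hr
        · simp only [List.mem_singleton] at hr
          rw [hr]; exact hp_ne
      · have : q = q0 := by
          rw [← hq0e]; simp [hqk]
        rw [this]; exact hprop _ hq0
    · -- nodup keys
      rw [hmod_a, hitems_a]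
      have : (a.items.map (fun q => if q.1 == aNm p then (aNm p, rs ++ [p]) else q)).map Prod.fst = a.items.map Prod.fst := by
        rw [List.map_map]
        apply List.map_congr_left
        intro q hq
        by_cases hqk : q.1 = aNm p <;> simp [hqk]
      rw [this]; exact hnd
  · -- fresh key
    have hcf : a.contains (aNm p) = false := by
      cases hcv : a.contains (aNm p)
      · rfl
      · exact absurd hcv hc
    have hbcf : b.contains (bNm p) = false := by rw [hcontains]; exact hcf
    have hnotin : ∀ q ∈ a.items, (q.1 == aNm p) = false := by
      intro q hq
      simp only [PySem.Dict.contains] at hcf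
      cases hv : (q.1 == aNm p)
      · rfl
      · exfalso
        have : a.items.any (fun q => q.1 == aNm p) = true := List.any_eq_true.mpr ⟨q, hq, hv⟩
        rw [this] at hcf; exact absurd hcf (by simp)
    have hbnotin : ∀ q ∈ b.items, (q.1 == bNm p) = false := by
      intro q hq
      rw [hit] at hq
      obtain ⟨q0, hq0, rfl⟩ := List.mem_map.mp hq
      exact hnotin q0 hq0
    have hbfind : b.items.find? (fun q => q.1 == bNm p) = none := by
      rw [List.find?_eq_none]
      intro q hq
      rw [hbnotin q hq]; simp
    have hgetDa : a.getD (aNm p) [] = [] := by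
      simp only [PySem.Dict.getD, PySem.Dict.get?]
      have hfa : a.items.find? (fun q => q.1 == aNm p) = none := by
        rw [List.find?_eq_none]
        intro q hq
        rw [hnotin q hq]; simp
      rw [hfa]; rfl
    have hmod_a : (a.modify (aNm p) [] (fun rs => rs ++ [p])).items = a.items ++ [(aNm p, [p])] := by
      simp only [PySem.Dict.modify, hgetDa, PySem.Dict.insert, hcf]
      simp
    have hsd : (b.setdefault (bNm p) (p, [])).items = b.items ++ [(bNm p, (p, []))] := by
      rw [PySem.Dict.setdefault_of_not_contains b (p, []) hbcf]
      simp [PySem.Dict.insert, hbcf]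
    have hconvp : convG [p] = (p, if aDig p then [(aVal p, p)] else []) := by
      unfold convG
      by_cases hd : aDig p <;> simp [hd]
    have hbitems : (if PySem.Str.strIsdigit (bYs p) then
        (b.setdefault (bNm p) (p, [])).modify (bNm p) (p, [])
          (fun e => (e.1, e.2 ++ [((PySem.Int.ofStr? (bYs p)).getD 0, p)]))
        else b.setdefault (bNm p) (p, [])).items =
        b.items ++ [(bNm p, (p, if aDig p then [(aVal p, p)] else []))] := by
      by_cases hd : PySem.Str.strIsdigit (bYs p)
      · rw [if_pos hd]
        have hb'get : (b.setdefault (bNm p) (p, [])).getD (bNm p) (p, []) = (p, []) := by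
          simp only [PySem.Dict.getD, PySem.Dict.get?, hsd]
          rw [List.find?_append, hbfind]
          simp
        have hb'contains : (b.setdefault (bNm p) (p, [])).contains (bNm p) = true := by
          simp only [PySem.Dict.contains, hsd, List.any_append]
          simp
        have hmapb : b.items.map (fun q => if q.1 == bNm p then
            (bNm p, ((p : List (String × String)), [((PySem.Int.ofStr? (bYs p)).getD 0, p)])) else q) = b.items := by
          apply List.map_congr_left (g := id) ?_ |>.trans (List.map_id _)
          intro q hq
          rw [hbnotin q hq]
          rfl
        simp only [PySem.Dict.modify, hb'get, PySem.Dict.insert, hb'contains, if_pos]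
        rw [hsd, List.map_append]
        simp only [List.nil_append]
        have hda : aDig p = true := hd
        rw [hmapb, hda]
        simp [aVal, bYs, aYs]
      · rw [if_neg hd, hsd]
        have hda : aDig p = false := by simpa [aDig] using hd
        rw [hda]
        simp
    refine ⟨?_, ?_, ?_⟩
    · rw [show (a.modify (aNm p) [] (fun rs => rs ++ [p])).items = a.items ++ [(aNm p, [p])] from hmod_a] at *
      rw [hbitems, hmod_a, List.map_append, hit]
      congr 1
      simp only [List.map_cons, List.map_nil, convQ, hconvp, hba]
    · intro q hq
      rw [hmod_a] at hq
      rcases List.mem_append.mp hq with hq | hq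
      · exact hprop q hq
      · simp only [List.mem_singleton] at hq
        subst hq
        refine ⟨hn, by simp, ?_⟩
        intro r hr
        simp only [List.mem_singleton] at hr
        subst hr
        exact hp_ne
    · rw [hmod_a, List.map_append]
      rw [List.nodup_append]
      refine ⟨hnd, by simp, ?_⟩
      have hnotmem : aNm p ∉ a.items.map Prod.fst := by
        intro hmem
        obtain ⟨q, hq, hq1⟩ := List.mem_map.mp hmem
        have h3 := hnotin q hq
        rw [hq1] at h3; simp at h3
      simp [hnotmem]
      intro a1 x hmem h2
      have h3 := hnotin (a1, x) hmem
      simp [h2] at h3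

theorem invG_fold (preds : List (List (String × String)))
    (a : PySem.Dict String (List (List (String × String))))
    (b : PySem.Dict String ((List (String × String)) × List (Int × List (String × String))))
    (h : InvG a b) : InvG (preds.foldl aGroupStep a) (preds.foldl bGroupStep b) := by
  induction preds generalizing a b with
  | nil => exact h
  | cons p t ih => exact ih _ _ (invG_step a b p h)

theorem invG_group (preds : List (List (String × String))) : InvG (aGroup preds) (bGroup preds) := by
  refine invG_fold preds _ _ ⟨rfl, ?_, ?_⟩
  · intro q hq; simp [PySem.Dict.empty] at hq
  · simp [PySem.Dict.empty]

theorem foldl_ext {α β : Type} (f g : β → α → β) (h : ∀ b a, f b a = g b a) :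
    ∀ (l : List α) (init : β), l.foldl f init = l.foldl g init := by
  intro l
  induction l with
  | nil => intro init; rfl
  | cons x t ih =>
    intro init
    rw [List.foldl_cons, List.foldl_cons, h]
    exact ih _

theorem main_eq (periods preds : List (List (String × String))) :
    dynamic_mapping_py periods preds = dynamic_mapping_py_alt periods preds := by
  obtain ⟨hit, hprop, hnd⟩ := invG_group preds
  simp only [dynamic_mapping_py, dynamic_mapping_py_alt]
  refine foldl_ext _ _ ?_ periods []
  intro acc period
  dsimp only
  rw [hit, List.foldl_map]
  apply PySem.List.foldl_congr_mem
  intro acc2 q hq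
  obtain ⟨hq1, hq2, hq3⟩ := hprop q hq
  obtain ⟨c, hA, hcmem, hcB⟩ :=
    choose_eq (PySem.Int.ofStr? ((PySem.Dict.mk period).getD "start_year" "")) q.2 hq2
  have hcne : c ≠ [] := hq3 c hcmem
  dsimp only [convQ]
  rw [hA, ← hcB]
  simp only [aField, if_neg hcne]

-- ===== VERDICT (by name: the statement is the Claim_ definition above) =====
theorem dynamic_mapping_py_spec : Claim_equal_dynamic_mapping_py := by
  intro periods preds _
  unfold Spec_dynamic_mapping_py
  exact main_eq periods preds
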